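-- pv_equiv track=rewrite | github.com/findaikichi-hub/ai-company-devcrew-jp | 01_original_source/devCrew_s_upstream/tools/sca_scanner/supply_chain_analyzer.py | _has_swapped_chars
-- ===== SOURCE A (Python) =====
-- def _has_swapped_chars(s1: str, s2: str) -> bool:
--     """Check if s1 is s2 with swapped adjacent characters."""
--     if len(s1) != len(s2):
--         return False
--
--     for i in range(len(s2) - 1):
--         modified = list(s2)
--         modified[i], modified[i + 1] = modified[i + 1], modified[i]
--         if "".join(modified) == s1:
--             return True
--     return False
-- ===== SOURCE B (Python) =====
-- def _has_swapped_chars(s1: str, s2: str) -> bool: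
--     """Check if s1 is s2 with swapped adjacent characters (single O(n) scan)."""
--     if len(s1) != len(s2):
--         return False
--     if s1 == s2:
--         # swapping two equal adjacent characters leaves the string unchanged
--         return any(s2[i] == s2[i + 1] for i in range(len(s2) - 1))
--     # find the first mismatch; it must be an adjacent transposition, rest identical
--     i = 0
--     while s1[i] == s2[i]:
--         i += 1
--     return (i + 1 < len(s1)
--             and s1[i] == s2[i + 1]
--             and s1[i + 1] == s2[i]
--             and s1[i + 2:] == s2[i + 2:])
-- ===== Notes on version B (the rewrite author's own statement) =====
-- stated objective: faster
-- what changed: Instead of materialising and comparing a swapped copy of s2 for every position (O(n^2)), B makes one scan: if the strings are equal it looks for any adjacent duplicate, otherwise it finds the first mismatch and checks it is an adjacent transposition with identical tails.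
import Mathlib
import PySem

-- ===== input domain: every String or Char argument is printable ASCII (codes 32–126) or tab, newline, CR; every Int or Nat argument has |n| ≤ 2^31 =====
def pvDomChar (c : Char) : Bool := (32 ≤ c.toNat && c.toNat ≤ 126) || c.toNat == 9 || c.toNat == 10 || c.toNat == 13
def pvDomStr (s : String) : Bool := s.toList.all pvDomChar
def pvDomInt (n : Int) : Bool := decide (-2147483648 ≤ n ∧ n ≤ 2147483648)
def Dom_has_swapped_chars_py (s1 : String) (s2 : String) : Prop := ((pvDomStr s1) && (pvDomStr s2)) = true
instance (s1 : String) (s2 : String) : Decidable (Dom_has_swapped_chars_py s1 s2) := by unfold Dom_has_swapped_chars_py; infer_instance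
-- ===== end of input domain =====

-- B replaces A's try-every-adjacent-swap O(n^2) loop with a single O(n) mismatch scan.

-- ===== PORT A =====
-- modified = list(s2); modified[i], modified[i+1] = modified[i+1], modified[i]
def swapA (l : List Char) (i : Nat) : List Char :=
  (l.set i (l.getD (i + 1) ' ')).set (i + 1) (l.getD i ' ')

-- the 'for i in range(len(s2)-1)' loop with early return True
def aLoop (l1 l2 : List Char) (i : Nat) : Bool :=
  if _h : i + 1 < l2.length then
    if swapA l2 i == l1 then true else aLoop l1 l2 (i + 1)
  else false
termination_by l2.length - i

def has_swapped_chars_py (s1 : String) (s2 : String) : Bool :=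
  let l1 := s1.toList
  let l2 := s2.toList
  if l1.length ≠ l2.length then false
  else aLoop l1 l2 0

-- ===== PORT B =====
-- any(s2[i] == s2[i+1] for i in range(len(s2)-1))
def adjDup : List Char → Bool
  | y :: y1 :: ys => y == y1 || adjDup (y1 :: ys)
  | _ => false

-- the 'while s1[i] == s2[i]' mismatch scan plus the transposition-and-tail check
def goB : List Char → List Char → Bool
  | x :: xs, y :: ys =>
      if x == y then goB xs ys
      else
        match xs, ys with
        | x2 :: xs', y2 :: ys' => x == y2 && x2 == y && xs' == ys'
        | _, _ => false
  | _, _ => false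

def has_swapped_chars_py_alt (s1 : String) (s2 : String) : Bool :=
  let l1 := s1.toList
  let l2 := s2.toList
  if l1.length ≠ l2.length then false
  else if l1 = l2 then adjDup l2
  else goB l1 l2

-- ===== PRECONDITION & SPEC =====
def Spec_has_swapped_chars_py (s1 : String) (s2 : String) (out : Bool) : Prop := out = has_swapped_chars_py_alt s1 s2
instance (s1 : String) (s2 : String) (out : Bool) : Decidable (Spec_has_swapped_chars_py s1 s2 out) := by unfold Spec_has_swapped_chars_py; infer_instance

-- ===== CLAIM (what is proved, stated in full; the proofs are below) =====
def Claim_equal_has_swapped_chars_py : Prop := ∀ (s1 : String) (s2 : String), Dom_has_swapped_chars_py s1 s2 → Spec_has_swapped_chars_py s1 s2 (has_swapped_chars_py s1 s2)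

-- ===== LEMMAS AND PROOFS =====

lemma swapA_zero (y y1 : Char) (ys : List Char) :
    swapA (y :: y1 :: ys) 0 = y1 :: y :: ys := by
  simp [swapA]

lemma swapA_succ (y : Char) (ys : List Char) (i : Nat) :
    swapA (y :: ys) (i + 1) = y :: swapA ys i := by
  simp [swapA]

lemma exists_swap_cons (x y : Char) (xs ys : List Char) :
    (∃ j, j + 1 < (y :: ys).length ∧ swapA (y :: ys) j = x :: xs) ↔
      ((∃ ys', ys = x :: ys' ∧ xs = y :: ys') ∨
        (x = y ∧ ∃ k, k + 1 < ys.length ∧ swapA ys k = xs)) := by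
  constructor
  · rintro ⟨j, hj, hswap⟩
    cases j with
    | zero =>
      cases ys with
      | nil => simp at hj
      | cons y1 ys' =>
        rw [swapA_zero] at hswap
        injection hswap with h1 h2
        exact Or.inl ⟨ys', by rw [h1], h2.symm⟩
    | succ k =>
      rw [swapA_succ] at hswap
      injection hswap with h1 h2
      refine Or.inr ⟨h1.symm, k, ?_, h2⟩
      simpa using hj
  · rintro (⟨ys', rfl, rfl⟩ | ⟨rfl, k, hk, hs⟩)
    · exact ⟨0, by simp, by rw [swapA_zero]⟩
    · exact ⟨k + 1, by simpa using hk, by rw [swapA_succ, hs]⟩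

lemma adjDup_cons (x y1 : Char) (ys' : List Char) :
    adjDup (x :: y1 :: ys') = ((x == y1) || adjDup (y1 :: ys')) := rfl

lemma goB_cons_ne (x y : Char) (xs ys : List Char) (h : ¬ x = y) :
    goB (x :: xs) (y :: ys) =
      (match xs, ys with
        | x2 :: xs', y2 :: ys' => x == y2 && x2 == y && xs' == ys'
        | _, _ => false) := by
  have hb : (x == y) = false := by simpa using h
  simp [goB, hb]

lemma goB_cons_eq (x : Char) (xs ys : List Char) :
    goB (x :: xs) (x :: ys) = goB xs ys := by
  simp [goB]

lemma main_char : ∀ (l2 l1 : List Char), l1.length = l2.length →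
    ((∃ j, j + 1 < l2.length ∧ swapA l2 j = l1) ↔
      (if l1 = l2 then adjDup l2 = true else goB l1 l2 = true)) := by
  intro l2
  induction l2 with
  | nil =>
    intro l1 hlen
    have h0 : l1 = [] := List.eq_nil_of_length_eq_zero (by simpa using hlen)
    subst h0
    simp [adjDup]
  | cons y ys IH =>
    intro l1 hlen
    cases l1 with
    | nil => simp at hlen
    | cons x xs =>
      simp only [List.length_cons, Nat.add_right_cancel_iff] at hlen
      rw [exists_swap_cons]
      by_cases hxy : x = y
      · subst hxy
        by_cases hx : xs = ys
        · subst hx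
          rw [if_pos rfl]
          have hIH := IH xs rfl
          rw [if_pos rfl] at hIH
          cases xs with
          | nil =>
            constructor
            · rintro (⟨t, h1, _⟩ | ⟨_, k, hk, _⟩)
              · cases h1
              · simp at hk
            · intro h
              cases h
          | cons y1 ys' =>
            constructor
            · rintro (⟨t, h1, _⟩ | ⟨_, h⟩)
              · injection h1 with ha _
                rw [adjDup_cons, ha]
                simp
              · rw [adjDup_cons]
                simp [hIH.mp h]
            · intro h
              rw [adjDup_cons] at h
              rcases (Bool.or_eq_true _ _).mp h with h | h
              · have hx1 : x = y1 := by simpa using h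
                exact Or.inl ⟨ys', by rw [hx1], by rw [hx1]⟩
              · exact Or.inr ⟨rfl, hIH.mpr h⟩
        · have hne : (x :: xs) ≠ (x :: ys) := by
            intro hcon; exact hx (by injection hcon)
          rw [if_neg hne, goB_cons_eq]
          have hIH := IH xs hlen
          rw [if_neg hx] at hIH
          rw [← hIH]
          constructor
          · rintro (⟨t, rfl, rfl⟩ | ⟨_, h⟩)
            · exact absurd rfl hx
            · exact h
          · intro h; exact Or.inr ⟨rfl, h⟩
      · have hne : (x :: xs) ≠ (y :: ys) := by
          intro hcon; exact hxy (by injection hcon)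
        rw [if_neg hne, goB_cons_ne x y xs ys hxy]
        cases xs with
        | nil =>
          cases ys with
          | cons y2 ys' => simp at hlen
          | nil =>
            constructor
            · rintro (⟨t, h1, _⟩ | ⟨h, _⟩)
              · cases h1
              · exact absurd h hxy
            · intro h
              cases h
        | cons x2 xs' =>
          cases ys with
          | nil => simp at hlen
          | cons y2 ys' =>
            constructor
            · rintro (⟨t, h1, h2⟩ | ⟨hc, _⟩)
              · injection h1 with ha hb
                injection h2 with hc hd
                subst ha; subst hb; subst hc; subst hd
                simp
              · exact absurd hc hxy
            · intro h
              simp only [Bool.and_eq_true, beq_iff_eq] at h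
              obtain ⟨⟨h1, h2⟩, h3⟩ := h
              exact Or.inl ⟨ys', by rw [h1], by rw [h2, h3]⟩

lemma aLoop_iff (l1 l2 : List Char) : ∀ i, (aLoop l1 l2 i = true ↔ ∃ j, i ≤ j ∧ j + 1 < l2.length ∧ swapA l2 j = l1) := by
  intro i
  fun_induction aLoop l1 l2 i with
  | case1 i h heq =>
    constructor
    · intro _
      exact ⟨i, le_refl i, h, by simpa using heq⟩
    · intro _; rfl
  | case2 i h heq IH =>
    rw [IH]
    constructor
    · rintro ⟨j, hj, h2, h3⟩
      exact ⟨j, Nat.le_of_succ_le hj, h2, h3⟩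
    · rintro ⟨j, hj, h2, h3⟩
      refine ⟨j, ?_, h2, h3⟩
      rcases Nat.lt_or_ge i j with hlt | hge
      · exact hlt
      · exfalso
        have : j = i := Nat.le_antisymm hge hj
        subst this
        simp [h3] at heq
  | case3 i h =>
    constructor
    · intro hcon; cases hcon
    · rintro ⟨j, hj, h2, _⟩
      exfalso; omega

-- ===== VERDICT (by name: the statement is the Claim_ definition above) =====
theorem has_swapped_chars_py_spec : Claim_equal_has_swapped_chars_py := by
  intro s1 s2 _
  unfold Spec_has_swapped_chars_py
  simp only [has_swapped_chars_py, has_swapped_chars_py_alt]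
  by_cases hlen : s1.toList.length = s2.toList.length
  · rw [if_neg (not_not_intro hlen), if_neg (not_not_intro hlen)]
    rw [Bool.eq_iff_iff, aLoop_iff]
    have hm := main_char s2.toList s1.toList hlen
    constructor
    · rintro ⟨j, _, h2, h3⟩
      have h := hm.mp ⟨j, h2, h3⟩
      split_ifs at h ⊢ <;> simp_all
    · intro h
      have hex : ∃ j, j + 1 < s2.toList.length ∧ swapA s2.toList j = s1.toList := by
        apply hm.mpr
        split_ifs at h ⊢ <;> simp_all
      obtain ⟨j, h2, h3⟩ := hex
      exact ⟨j, Nat.zero_le j, h2, h3⟩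
  · rw [if_pos hlen, if_pos hlen]
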